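-- pv_equiv track=rewrite | github.com/s-hisham-gh/AI-Fundamentals | task1/p7.py | number_of_attacks
-- ===== SOURCE A (Python) =====
-- def position_cost(nqueens):
--     cost = 0
--     for i in range(len(nqueens)):
--         for j in range(i+1, len(nqueens)):
--             if (nqueens[i][0] == nqueens[j][0] or nqueens[i][1] == nqueens[j][1] or
--                 abs(nqueens[i][0]-nqueens[j][0]) == abs(nqueens[i][1]-nqueens[j][1])):
--                 cost += 1
--     return cost
--
-- def number_of_attacks(problem):
--     board = []
--     for i in range(8):
--         rows = []
--         for j in range(8):
--             rows.append(0)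
--         board.append(rows)
--
--     for x in range(0, 8, 1):
--         for y in range(0, 8, 1):
--             board[y][x] = position_cost(problem[:x]+[(y, x)]+problem[x+1:])
--     return board
-- ===== SOURCE B (Python) =====
-- def number_of_attacks(problem):
--     # Per column x: compute once the attack count among the other queens
--     # (base), then each cell (y, x) adds only the new queen's own attacks.
--     def attacks(p, q):
--         return (p[0] == q[0] or p[1] == q[1]
--                 or abs(p[0] - q[0]) == abs(p[1] - q[1]))
--
--     cols = []
--     for x in range(8):
--         others = problem[:x] + problem[x + 1:]
--         base = 0
--         rest = others
--         while rest:
--             p, rest = rest[0], rest[1:]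
--             base += sum(1 for q in rest if attacks(p, q))
--         cols.append((x, others, base))
--
--     return [[base + sum(1 for q in others if attacks((y, x), q))
--              for (x, others, base) in cols]
--             for y in range(8)]
-- ===== Notes on version B (the rewrite author's own statement) =====
-- stated objective: faster
-- what changed: Instead of rebuilding the candidate list and rescanning all pairs for each of the 64 cells, B computes per column x a single pair-scan over the other queens (base) and fills each cell (y,x) as base plus the single new queen's attack count over the others.
import Mathlib
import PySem

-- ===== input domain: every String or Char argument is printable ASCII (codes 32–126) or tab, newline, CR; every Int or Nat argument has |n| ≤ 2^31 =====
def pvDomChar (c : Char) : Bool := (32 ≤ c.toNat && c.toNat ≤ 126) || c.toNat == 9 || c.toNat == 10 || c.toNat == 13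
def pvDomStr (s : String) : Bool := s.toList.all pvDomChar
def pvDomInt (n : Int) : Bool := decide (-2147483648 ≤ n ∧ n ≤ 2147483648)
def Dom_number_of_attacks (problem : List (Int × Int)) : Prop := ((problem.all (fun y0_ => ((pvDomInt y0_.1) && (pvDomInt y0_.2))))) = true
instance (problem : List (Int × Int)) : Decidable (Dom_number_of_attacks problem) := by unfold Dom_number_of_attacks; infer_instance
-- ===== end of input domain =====

-- B replaces A's per-cell full pair rescan by one per-column pair scan plus a
-- linear new-queen attack count per cell (measurably faster; same return value).


-- ===== PORT A =====
-- position_cost: double index loop over all pairs i < j (attack test inline, as in A).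
def position_cost (nqueens : List (Int × Int)) : Int :=
  (PySem.List.pyRange 0 nqueens.length 1).foldl (fun cost i =>
    (PySem.List.pyRange (i + 1) nqueens.length 1).foldl (fun cost j =>
      if (PySem.List.pyGetD nqueens i ((0 : Int), (0 : Int))).1 == (PySem.List.pyGetD nqueens j ((0 : Int), (0 : Int))).1 ||
         (PySem.List.pyGetD nqueens i ((0 : Int), (0 : Int))).2 == (PySem.List.pyGetD nqueens j ((0 : Int), (0 : Int))).2 ||
         |(PySem.List.pyGetD nqueens i ((0 : Int), (0 : Int))).1 - (PySem.List.pyGetD nqueens j ((0 : Int), (0 : Int))).1| ==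
         |(PySem.List.pyGetD nqueens i ((0 : Int), (0 : Int))).2 - (PySem.List.pyGetD nqueens j ((0 : Int), (0 : Int))).2| then cost + 1 else cost)
      cost) 0

-- board[y][x] = v: indices y,x ∈ 0..7 are always in range, so the nested
-- List.set with .toNat is exact for Python's in-place assignment here.
def number_of_attacks (problem : List (Int × Int)) : List (List Int) :=
  let board : List (List Int) :=
    (PySem.List.pyRange 0 8 1).foldl (fun board _i =>
      board ++ [(PySem.List.pyRange 0 8 1).foldl (fun rows _j => rows ++ [(0 : Int)]) []]) []
  (PySem.List.pyRange 0 8 1).foldl (fun board x =>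
    (PySem.List.pyRange 0 8 1).foldl (fun board y =>
      board.set y.toNat ((board.getD y.toNat []).set x.toNat
        (position_cost (PySem.List.slice problem none (some x) ++ [(y, x)] ++
                        PySem.List.slice problem (some (x + 1)) none)))) board) board

-- ===== PORT B =====
def att (p q : Int × Int) : Bool :=
  p.1 == q.1 || p.2 == q.2 || |p.1 - q.1| == |p.2 - q.2|

-- B's head/tail pair-count loop ('while rest: p, rest = rest[0], rest[1:]; …')
def pair_cost : List (Int × Int) → Int
  | [] => 0
  | p :: rest => (rest.countP (fun q => att p q) : Int) + pair_cost rest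

def number_of_attacks_alt (problem : List (Int × Int)) : List (List Int) :=
  let cols : List (Int × List (Int × Int) × Int) :=
    (PySem.List.pyRange 0 8 1).map (fun x =>
      let others := PySem.List.slice problem none (some x) ++
                    PySem.List.slice problem (some (x + 1)) none
      (x, others, pair_cost others))
  (PySem.List.pyRange 0 8 1).map (fun y =>
    cols.map (fun c => c.2.2 + (c.2.1.countP (fun q => att (y, c.1) q) : Int)))

-- ===== PRECONDITION & SPEC =====
def Spec_number_of_attacks (problem : List (Int × Int)) (out : List (List Int)) : Prop := out = number_of_attacks_alt problem
instance (problem : List (Int × Int)) (out : List (List Int)) : Decidable (Spec_number_of_attacks problem out) := by unfold Spec_number_of_attacks; infer_instance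

-- ===== CLAIM (what is proved, stated in full; the proofs are below) =====
def Claim_equal_number_of_attacks : Prop := ∀ (problem : List (Int × Int)), Dom_number_of_attacks problem → Spec_number_of_attacks problem (number_of_attacks problem)

-- ===== LEMMAS AND PROOFS =====

theorem att_symm (p q : Int × Int) : att p q = att q p := by
  rw [Bool.eq_iff_iff]
  simp only [att, abs_sub_comm, Bool.or_eq_true, beq_iff_eq]
  constructor <;> rintro ((h | h) | h)
  · exact Or.inl (Or.inl h.symm)
  · exact Or.inl (Or.inr h.symm)
  · exact Or.inr h
  · exact Or.inl (Or.inl h.symm)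
  · exact Or.inl (Or.inr h.symm)
  · exact Or.inr h

-- the inner j-loop of position_cost counts attackers of l[i] among l.drop (i+1)
theorem inner_loop_eq (l : List (Int × Int)) (p : Int × Int) (i : Int) (hi : 0 ≤ i)
    (c : Int) :
    (PySem.List.pyRange (i + 1) l.length 1).foldl (fun cost j =>
      if p.1 == (PySem.List.pyGetD l j ((0 : Int), (0 : Int))).1 ||
         p.2 == (PySem.List.pyGetD l j ((0 : Int), (0 : Int))).2 ||
         |p.1 - (PySem.List.pyGetD l j ((0 : Int), (0 : Int))).1| ==
         |p.2 - (PySem.List.pyGetD l j ((0 : Int), (0 : Int))).2| then cost + 1 else cost) c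
    = c + ((l.drop (i + 1).toNat).countP (fun q => att p q) : Int) := by
  rw [PySem.List.foldl_pyRange_pyGetD' l ((0 : Int), (0 : Int))
      (fun cost b => if p.1 == b.1 || p.2 == b.2 || |p.1 - b.1| == |p.2 - b.2| then cost + 1 else cost)
      c (a := i + 1) (by omega)]
  exact PySem.List.foldl_if_add_one _ _ _

-- the outer i-loop equals B's structural pair count
theorem outer_loop_eq (l : List (Int × Int)) :
    ∀ (c : Int),
    (List.range l.length).foldl (fun cost k =>
      cost + ((l.drop (k + 1)).countP
        (fun q => att (l.getD k ((0 : Int), (0 : Int))) q) : Int)) c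
    = c + pair_cost l := by
  induction l with
  | nil => intro c; simp [pair_cost]
  | cons p l ih =>
      intro c
      rw [List.length_cons, List.range_succ_eq_map, List.foldl_cons, List.foldl_map]
      simp only [List.getD_cons_succ, List.drop_succ_cons, List.getD_cons_zero]
      rw [ih]
      simp [pair_cost]; ring

theorem position_cost_eq (l : List (Int × Int)) : position_cost l = pair_cost l := by
  unfold position_cost
  rw [show ((0 : Int)) = ((0 : Nat) : Int) from rfl,
      show ((l.length : Int)) = ((l.length : Nat) : Int) from rfl,
      PySem.List.pyRange_one]
  simp only [Nat.cast_zero, Int.sub_zero, Int.toNat_natCast, List.foldl_map, zero_add]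
  have h : ∀ (c : Int) (k : Nat),
      (PySem.List.pyRange ((k : Int) + 1) l.length 1).foldl (fun cost j =>
        let b := PySem.List.pyGetD l j ((0 : Int), (0 : Int))
        let a := PySem.List.pyGetD l (k : Int) ((0 : Int), (0 : Int))
        if a.1 == b.1 || a.2 == b.2 || |a.1 - b.1| == |a.2 - b.2| then cost + 1 else cost) c
      = c + ((l.drop (k + 1)).countP
          (fun q => att (l.getD k ((0 : Int), (0 : Int))) q) : Int) := by
    intro c k
    have := inner_loop_eq l (PySem.List.pyGetD l (k : Int) ((0 : Int), (0 : Int))) (k : Int)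
      (by omega) c
    simpa [PySem.List.pyGetD_natCast] using this
  calc (List.range l.length).foldl _ 0
      = (List.range l.length).foldl (fun cost k =>
          cost + ((l.drop (k + 1)).countP
            (fun q => att (l.getD k ((0 : Int), (0 : Int))) q) : Int)) 0 := by
        apply PySem.List.foldl_congr_mem
        intro c k _; exact h c k
    _ = pair_cost l := by rw [outer_loop_eq]; ring

-- inserting a queen q anywhere: pair count = pair count of the others + q's attacks
theorem pair_cost_insert (q : Int × Int) :
    ∀ (l₁ l₂ : List (Int × Int)),
    pair_cost (l₁ ++ q :: l₂) =
      pair_cost (l₁ ++ l₂) + (((l₁ ++ l₂).countP (fun r => att q r)) : Int) := by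
  intro l₁; induction l₁ with
  | nil => intro l₂; simp [pair_cost]; ring
  | cons p l₁ ih =>
      intro l₂
      simp only [List.cons_append, pair_cost, ih]
      rw [List.countP_append, List.countP_append, List.countP_cons]
      have hs : (att p q = true) = (att q p = true) := by rw [att_symm]
      simp only [hs]
      by_cases hpq : att q p = true <;> simp [hpq] <;> ring

-- per-cell equality: A's cell value = B's cell value
theorem cell_eq (problem : List (Int × Int)) (x y : Int) :
    position_cost (PySem.List.slice problem none (some x) ++ [(y, x)] ++
                   PySem.List.slice problem (some (x + 1)) none)
    = pair_cost (PySem.List.slice problem none (some x) ++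
                 PySem.List.slice problem (some (x + 1)) none)
      + (((PySem.List.slice problem none (some x) ++
           PySem.List.slice problem (some (x + 1)) none).countP
            (fun q => att (y, x) q)) : Int) := by
  rw [position_cost_eq, List.append_assoc, List.singleton_append, pair_cost_insert]

-- evaluation of A's nested set-loop: each column pass is a mapIdx (proved by induction,
-- avoiding the exponential term blow-up of direct defeq evaluation)
theorem cons_fold (x : Nat) (v : Nat → Int) :
    ∀ (idxs : List Nat) (a : List Int) (l : List (List Int)),
    idxs.foldl (fun b y => b.set (y+1) ((b.getD (y+1) []).set x (v y))) (a :: l)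
    = a :: idxs.foldl (fun b y => b.set y ((b.getD y []).set x (v y))) l := by
  intro idxs
  induction idxs with
  | nil => intro a l; rfl
  | cons y ys ih =>
      intro a l
      rw [List.foldl_cons, List.foldl_cons, List.set_cons_succ, List.getD_cons_succ, ih]

theorem setfold (x : Nat) :
    ∀ (board : List (List Int)) (v : Nat → Int),
    (List.range board.length).foldl (fun b y => b.set y ((b.getD y []).set x (v y))) board
    = board.mapIdx (fun y row => row.set x (v y)) := by
  intro board
  induction board with
  | nil => intro v; simp
  | cons r rs ih =>
      intro v
      rw [List.length_cons, List.range_succ_eq_map, List.foldl_cons, List.foldl_map,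
        List.set_cons_zero, List.getD_cons_zero,
        cons_fold x (fun y => v (y + 1)) (List.range rs.length) (r.set x (v 0)) rs,
        ih (fun y => v (y + 1)), List.mapIdx_cons]

theorem colstep (f : Int → Int → Int) (x : Int) (board : List (List Int))
    (h : board.length = 8) :
    (PySem.List.pyRange 0 8 1).foldl (fun b y =>
      b.set y.toNat ((b.getD y.toNat []).set x.toNat (f x y))) board
    = board.mapIdx (fun y row => row.set x.toNat (f x (y : Int))) := by
  rw [show ((8 : Int)) = (((8 : Nat)) : Int) from rfl, PySem.List.pyRange_zero_nat,
    List.foldl_map]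
  simp only [Int.toNat_natCast]
  rw [show (8 : Nat) = board.length from h.symm]
  exact setfold x.toNat board (fun k => f x (k : Int))

theorem outer_fold (f : Int → Int → Int) :
    ∀ (xs : List Int) (board : List (List Int)), board.length = 8 →
    xs.foldl (fun board x =>
      (PySem.List.pyRange 0 8 1).foldl (fun b y =>
        b.set y.toNat ((b.getD y.toNat []).set x.toNat (f x y))) board) board
    = xs.foldl (fun board x =>
        board.mapIdx (fun y row => row.set x.toNat (f x (y : Int)))) board := by
  intro xs
  induction xs with
  | nil => intro board _; rfl
  | cons x xs ih =>
      intro board h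
      rw [List.foldl_cons, List.foldl_cons, colstep f x board h]
      exact ih _ (by simp [h])

theorem board_eval (f : Int → Int → Int) :
    (PySem.List.pyRange 0 8 1).foldl (fun board x =>
      (PySem.List.pyRange 0 8 1).foldl (fun board y =>
        board.set y.toNat ((board.getD y.toNat []).set x.toNat (f x y))) board)
      ((PySem.List.pyRange 0 8 1).foldl (fun board _i =>
        board ++ [(PySem.List.pyRange 0 8 1).foldl (fun rows _j => rows ++ [(0 : Int)]) []]) [])
    = (PySem.List.pyRange 0 8 1).map (fun y => (PySem.List.pyRange 0 8 1).map (fun x => f x y)) := by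
  rw [outer_fold f (PySem.List.pyRange 0 8 1) _ (by rfl)]
  rfl

-- ===== VERDICT (by name: the statement is the Claim_ definition above) =====
theorem number_of_attacks_spec : Claim_equal_number_of_attacks := by
  intro problem _
  unfold Spec_number_of_attacks number_of_attacks number_of_attacks_alt
  rw [board_eval (fun x y =>
    position_cost (PySem.List.slice problem none (some x) ++ [(y, x)] ++
                   PySem.List.slice problem (some (x + 1)) none))]
  apply List.map_congr_left
  intro y _
  rw [List.map_map]
  apply List.map_congr_left
  intro x _
  exact cell_eq problem x y
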